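-- pv_equiv track=rewrite | github.com/MatheusFreitas25/Python-Studies | Function_exercises/oldMacdonald.py | oldmacdonald
-- ===== SOURCE A (Python) =====
-- def oldmacdonald(name):
--     x = []
--     for i in range(len(name)):
--         if i == 0 or i == 3:
--             x.append(name[i].upper())
--         else:
--             x.append(name[i])
--     return ''.join(x)
-- ===== SOURCE B (Python) =====
-- def oldmacdonald(name):
--     return name[:1].upper() + name[1:3] + name[3:4].upper() + name[4:]
-- ===== Notes on version B (the rewrite author's own statement) =====
-- stated objective: idiomatic
-- what changed: Replaced the per-character index loop with list accumulator and join by a single concatenation of four fixed slices, upper-casing the first and fourth slice.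
import Mathlib
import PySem

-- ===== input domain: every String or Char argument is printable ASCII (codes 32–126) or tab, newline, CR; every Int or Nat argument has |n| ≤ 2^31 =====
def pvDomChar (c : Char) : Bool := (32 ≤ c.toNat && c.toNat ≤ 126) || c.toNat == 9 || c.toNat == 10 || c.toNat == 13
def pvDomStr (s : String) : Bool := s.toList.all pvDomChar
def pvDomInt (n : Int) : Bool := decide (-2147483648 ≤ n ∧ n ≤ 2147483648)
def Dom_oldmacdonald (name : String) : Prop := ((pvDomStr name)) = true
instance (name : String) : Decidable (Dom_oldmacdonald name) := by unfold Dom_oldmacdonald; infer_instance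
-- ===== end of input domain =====

-- B replaces A's per-character index loop (list accumulator + ''.join) by one concatenation of
-- four fixed slices with the first and fourth slice upper-cased (objective: idiomatic).

-- ===== PORT A =====
-- the loop body: on index i, append name[i].upper() if i == 0 or i == 3, else name[i]
-- (i ranges over range(len(name)), so indexing is in range and pyGetD is exact; .upper() of the
-- one-char string name[i] is upperChar of that char)
def oldmacdonaldStep (cs : List Char) (x : List Char) (i : Int) : List Char :=
  if i = 0 ∨ i = 3 then x ++ [PySem.Chars.upperChar (PySem.List.pyGetD cs i ' ')]
  else x ++ [PySem.List.pyGetD cs i ' ']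

-- ''.join(x) of the accumulated one-char strings is the string of the accumulated char list
def oldmacdonald (name : String) : String :=
  String.ofList ((PySem.List.pyRange 0 name.toList.length 1).foldl (oldmacdonaldStep name.toList) [])

-- ===== PORT B =====
-- name[:1].upper() + name[1:3] + name[3:4].upper() + name[4:]
def oldmacdonald_alt (name : String) : String :=
  String.ofList
    (PySem.Chars.upper (PySem.List.slice name.toList none (some 1))
      ++ PySem.List.slice name.toList (some 1) (some 3)
      ++ PySem.Chars.upper (PySem.List.slice name.toList (some 3) (some 4))
      ++ PySem.List.slice name.toList (some 4) none)

-- ===== PRECONDITION & SPEC =====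
def Spec_oldmacdonald (name : String) (out : String) : Prop := out = oldmacdonald_alt name
instance (name : String) (out : String) : Decidable (Spec_oldmacdonald name out) := by unfold Spec_oldmacdonald; infer_instance

-- ===== CLAIM (what is proved, stated in full; the proofs are below) =====
def Claim_equal_oldmacdonald : Prop := ∀ (name : String), Dom_oldmacdonald name → Spec_oldmacdonald name (oldmacdonald name)

-- ===== LEMMAS AND PROOFS =====

-- the loop body as a single append of a conditional element
theorem oldmacdonaldStep_eq (cs : List Char) :
    oldmacdonaldStep cs = fun x i =>
      x ++ [if i = 0 ∨ i = 3 then PySem.Chars.upperChar (PySem.List.pyGetD cs i ' ')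
            else PySem.List.pyGetD cs i ' '] := by
  funext x i; unfold oldmacdonaldStep; split_ifs <;> rfl

-- char-level core: A's indexed fold equals B's four slices
theorem oldmacdonald_chars_eq (cs : List Char) :
    (PySem.List.pyRange 0 cs.length 1).foldl (oldmacdonaldStep cs) [] =
      PySem.Chars.upper (PySem.List.slice cs none (some 1))
        ++ PySem.List.slice cs (some 1) (some 3)
        ++ PySem.Chars.upper (PySem.List.slice cs (some 3) (some 4))
        ++ PySem.List.slice cs (some 4) none := by
  rw [oldmacdonaldStep_eq, PySem.List.foldl_append_singleton_eq_map]
  match cs with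
  | [] => decide
  | [a] =>
    simp [show PySem.List.pyRange 0 (1:Int) = [0] from by decide,
      PySem.List.pyGetD_ofNat', PySem.Chars.upper, PySem.List.slice_toNat,
      PySem.List.slice_to, PySem.List.slice_from]
  | [a,b] =>
    simp [show PySem.List.pyRange 0 (2:Int) = [0,1] from by decide,
      PySem.List.pyGetD_ofNat', PySem.Chars.upper, PySem.List.slice_toNat,
      PySem.List.slice_to, PySem.List.slice_from]
  | [a,b,c] =>
    simp [show PySem.List.pyRange 0 (3:Int) = [0,1,2] from by decide,
      PySem.List.pyGetD_ofNat', PySem.Chars.upper, PySem.List.slice_toNat,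
      PySem.List.slice_to, PySem.List.slice_from]
  | a :: b :: c :: d :: t =>
    have hlen : (a :: b :: c :: d :: t).length = t.length + 4 := by simp
    have h4 : (4:Int) ≤ ((a :: b :: c :: d :: t).length : Int) := by omega
    rw [PySem.List.pyRange_one_cons (by omega), PySem.List.pyRange_one_cons (by omega),
        PySem.List.pyRange_one_cons (by omega), PySem.List.pyRange_one_cons (by omega)]
    norm_num
    rw [show ((t.length : Int) + 1 + 1 + 1 + 1) = ((a :: b :: c :: d :: t).length : Int) from by
          push_cast [List.length_cons]; ring,
        List.map_congr_left (l := PySem.List.pyRange 4 ((a :: b :: c :: d :: t).length : Int))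
      (g := fun j => PySem.List.pyGetD (a :: b :: c :: d :: t) j ' ')
      (fun i hi => by
        rw [PySem.List.mem_pyRange_one] at hi
        simp only [if_neg (by omega : ¬ (i = 0 ∨ i = 3))]),
      PySem.List.map_pyGetD_pyRange' _ ' ' (by norm_num)]
    simp [PySem.List.pyGetD_ofNat', PySem.Chars.upper, PySem.List.slice_toNat,
      PySem.List.slice_to, PySem.List.slice_from]

-- ===== VERDICT (by name: the statement is the Claim_ definition above) =====
theorem oldmacdonald_spec : Claim_equal_oldmacdonald := by
  intro name _
  unfold Spec_oldmacdonald oldmacdonald oldmacdonald_alt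
  rw [oldmacdonald_chars_eq]
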